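-- pv_equiv track=rewrite | github.com/db0/Doomtown-for-OCTGN | o8g/Scripts/generic.py | formStringEscape
-- ===== SOURCE A (Python) =====
-- def formStringEscape(STRING): # A function to escape some characters that are not otherwise displayed by WinForms, like amperasands '&'
--    slist = list(STRING)
--    escapedString = ''
--    for s in slist:
--       if s == '&': char = '&&'
--       else: char = s
--       escapedString += char
--    return escapedString
-- ===== SOURCE B (Python) =====
-- def formStringEscape(STRING): # escape '&' for WinForms by doubling it: split on '&' and rejoin with '&&'
--    return '&&'.join(STRING.split('&'))
-- ===== Notes on version B (the rewrite author's own statement) =====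
-- stated objective: idiomatic
-- what changed: Replaces the character-by-character accumulation loop with a single split on the '&' delimiter followed by a join with '&&', built in bulk by str.join instead of repeated concatenation.
import Mathlib
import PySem

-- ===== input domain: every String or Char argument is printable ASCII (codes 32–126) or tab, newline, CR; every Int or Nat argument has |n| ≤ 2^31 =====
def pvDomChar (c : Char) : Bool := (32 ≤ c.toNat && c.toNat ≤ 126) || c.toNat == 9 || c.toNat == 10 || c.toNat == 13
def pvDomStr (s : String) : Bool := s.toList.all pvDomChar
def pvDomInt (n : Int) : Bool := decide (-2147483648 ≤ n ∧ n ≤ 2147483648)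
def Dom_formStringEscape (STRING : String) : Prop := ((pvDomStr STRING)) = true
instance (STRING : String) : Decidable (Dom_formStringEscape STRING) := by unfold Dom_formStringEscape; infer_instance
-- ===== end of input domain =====

-- B replaces A's character-by-character accumulation loop by split-on-'&' then join-with-'&&' (idiomatic).


-- ===== PORT A =====
-- slist = list(STRING); for s in slist: char = '&&' if s == '&' else s; escapedString += char
def formStringEscape (STRING : String) : String :=
  String.ofList (STRING.toList.foldl
    (fun escapedString s => escapedString ++ (if s = '&' then ['&', '&'] else [s])) [])

-- ===== PORT B =====
-- return '&&'.join(STRING.split('&'))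
def formStringEscape_alt (STRING : String) : String :=
  PySem.Str.join "&&" ((PySem.Str.split? STRING "&").getD [])

-- ===== PRECONDITION & SPEC =====
def Spec_formStringEscape (STRING : String) (out : String) : Prop := out = formStringEscape_alt STRING
instance (STRING : String) (out : String) : Decidable (Spec_formStringEscape STRING out) := by unfold Spec_formStringEscape; infer_instance

-- ===== CLAIM (what is proved, stated in full; the proofs are below) =====
def Claim_equal_formStringEscape : Prop := ∀ (STRING : String), Dom_formStringEscape STRING → Spec_formStringEscape STRING (formStringEscape STRING)

-- ===== LEMMAS AND PROOFS =====

-- proof-only helper: the pieces STRING.split('&') produces, by simple structural recursion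
def pvPieces : List Char → List (List Char)
  | [] => [[]]
  | c :: rest =>
    if c = '&' then [] :: pvPieces rest
    else
      match pvPieces rest with
      | [] => [[c]]
      | p :: ps => (c :: p) :: ps

-- proof-only helper: prepend xs onto the first piece
def pvConsHead (xs : List Char) : List (List Char) → List (List Char)
  | [] => [xs]
  | p :: ps => (xs ++ p) :: ps

theorem pvPieces_ne_nil (cs : List Char) : pvPieces cs ≠ [] := by
  cases cs with
  | nil => simp [pvPieces]
  | cons c rest =>
    simp only [pvPieces]
    split
    · simp
    · split <;> simp

theorem pv_join_cons_head (c : Char) (q : List Char) (qs : List (List Char)) :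
    PySem.Chars.join ['&', '&'] ((c :: q) :: qs) = c :: PySem.Chars.join ['&', '&'] (q :: qs) := by
  cases qs with
  | nil => simp [PySem.Chars.join_singleton]
  | cons r rs => simp [PySem.Chars.join_cons_cons]

theorem pv_go_spec : ∀ (fuel : Nat) (l cur : List Char) (acc : List (List Char)),
    l.length < fuel →
    PySem.Chars.splitOn.go ['&'] fuel l cur acc = acc.reverse ++ pvConsHead cur.reverse (pvPieces l) := by
  intro fuel
  induction fuel with
  | zero => intro l cur acc h; omega
  | succ fuel ih =>
    intro l cur acc h
    cases l with
    | nil =>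
      simp [PySem.Chars.splitOn.go, pvPieces, pvConsHead]
    | cons c rest =>
      rw [PySem.Chars.splitOn.go]
      by_cases hc : c = '&'
      · subst hc
        have hpre : List.isPrefixOf ['&'] ('&' :: rest) = true := by
          simp [List.isPrefixOf]
        rw [if_pos hpre]
        simp only [List.length_singleton, List.drop_succ_cons, List.drop_zero]
        simp only [List.length_cons] at h
        rw [ih _ _ _ (by omega)]
        have hne := pvPieces_ne_nil rest
        cases hq : pvPieces rest with
        | nil => exact absurd hq hne
        | cons q qs =>
          simp [pvPieces, pvConsHead, hq]
      · have hpre : List.isPrefixOf ['&'] (c :: rest) = false := by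
          simp only [List.isPrefixOf, Bool.and_true]
          exact decide_eq_false (fun h => hc h.symm)
        rw [if_neg (by simp [hpre])]
        simp only [List.length_cons] at h
        rw [ih _ _ _ (by omega)]
        have hne := pvPieces_ne_nil rest
        cases hq : pvPieces rest with
        | nil => exact absurd hq hne
        | cons q qs =>
          simp [pvPieces, pvConsHead, hq, hc, List.append_assoc]

theorem pv_splitOn_eq_pieces (cs : List Char) :
    PySem.Chars.splitOn cs ['&'] = pvPieces cs := by
  rw [PySem.Chars.splitOn, pv_go_spec _ _ _ _ (by omega)]
  have hne := pvPieces_ne_nil cs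
  cases hq : pvPieces cs with
  | nil => exact absurd hq hne
  | cons q qs => simp [pvConsHead]

theorem pv_join_pieces (cs : List Char) :
    PySem.Chars.join ['&', '&'] (pvPieces cs)
      = cs.flatMap (fun s => if s = '&' then ['&', '&'] else [s]) := by
  induction cs with
  | nil => simp [pvPieces, PySem.Chars.join_singleton]
  | cons c rest ih =>
    by_cases hc : c = '&'
    · subst hc
      have hne := pvPieces_ne_nil rest
      cases hq : pvPieces rest with
      | nil => exact absurd hq hne
      | cons q qs =>
        have hp2 : pvPieces ('&' :: rest) = [] :: pvPieces rest := by simp [pvPieces]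
        rw [hp2, hq, PySem.Chars.join_cons_cons, ← hq, ih]
        simp
    · have hne := pvPieces_ne_nil rest
      cases hq : pvPieces rest with
      | nil => exact absurd hq hne
      | cons q qs =>
        have hp2 : pvPieces (c :: rest) = (c :: q) :: qs := by simp [pvPieces, hc, hq]
        rw [hp2, pv_join_cons_head, ← hq, ih]
        simp [hc]

-- ===== VERDICT (by name: the statement is the Claim_ definition above) =====
theorem formStringEscape_spec : Claim_equal_formStringEscape := by
  intro STRING _
  unfold Spec_formStringEscape formStringEscape formStringEscape_alt
  have hsplit := PySem.Str.split?_map STRING "&"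
  have hsep : ("&" : String).toList = ['&'] := by decide
  rw [hsep] at hsplit
  rw [PySem.Chars.split?, if_neg (by decide)] at hsplit
  cases hp : PySem.Str.split? STRING "&" with
  | none => rw [hp] at hsplit; simp at hsplit
  | some parts =>
    rw [hp] at hsplit
    simp only [Option.map_some] at hsplit
    have hparts : parts.map String.toList = PySem.Chars.splitOn STRING.toList ['&'] :=
      Option.some.inj hsplit
    apply String.ext  -- strings equal iff their char lists are equal
    show (String.ofList _).toList = _
    rw [PySem.Str.toList_join, Option.getD_some, hparts, pv_splitOn_eq_pieces,
      show ("&&" : String).toList = ['&', '&'] from by decide, pv_join_pieces]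
    simp [List.flatMap]
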